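-- pv_equiv track=rewrite | github.com/productive-pro/sarthak | scripts/sync_catalog.py | _capabilities_from_aimlapi
-- ===== SOURCE A (Python) =====
-- def _capabilities_from_aimlapi(features: list[str]) -> list[str]:
--     caps: set[str] = set()
--     features_set = set(features)
--
--     # Map AIMLAPI features to our capability system
--     if any("vision" in f for f in features_set):
--         caps.add("vision")
--     if any("function" in f or "tool" in f for f in features_set):
--         caps.add("tools")
--     if any("audio" in f for f in features_set):
--         caps.add("audio")
--     if any("code" in f for f in features_set):
--         caps.add("code")
--     if any("reasoning" in f or "thinking" in f for f in features_set):
--         caps.add("reasoning")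
--     if any("embed" in f for f in features_set):
--         caps.add("embedding")
--
--     return sorted(caps)
-- ===== SOURCE B (Python) =====
-- def _capabilities_from_aimlapi(features: list[str]) -> list[str]:
--     caps: set[str] = set()
--     for f in features:
--         if "vision" in f:
--             caps.add("vision")
--         if "function" in f or "tool" in f:
--             caps.add("tools")
--         if "audio" in f:
--             caps.add("audio")
--         if "code" in f:
--             caps.add("code")
--         if "reasoning" in f or "thinking" in f:
--             caps.add("reasoning")
--         if "embed" in f:
--             caps.add("embedding")
--     return sorted(caps)
-- ===== Notes on version B (the rewrite author's own statement) =====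
-- stated objective: simpler
-- what changed: Replaces six separate any(...) scans over the feature set with a single pass over the features that adds every matching capability label to the set as each feature is examined.
import Mathlib
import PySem

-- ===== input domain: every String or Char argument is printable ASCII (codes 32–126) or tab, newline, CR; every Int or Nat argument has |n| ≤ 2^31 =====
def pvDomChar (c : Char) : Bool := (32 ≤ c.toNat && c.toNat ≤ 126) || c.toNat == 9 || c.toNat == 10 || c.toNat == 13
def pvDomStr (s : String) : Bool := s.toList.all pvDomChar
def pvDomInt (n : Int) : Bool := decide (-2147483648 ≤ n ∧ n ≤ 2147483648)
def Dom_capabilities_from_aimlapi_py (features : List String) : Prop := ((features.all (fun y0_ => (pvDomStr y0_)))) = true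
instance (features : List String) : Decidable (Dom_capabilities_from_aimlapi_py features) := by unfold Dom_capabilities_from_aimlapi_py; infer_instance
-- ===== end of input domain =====

-- B replaces A's six separate any(...) scans over set(features) with one pass over the features (simpler decomposition; same result).

-- ===== PORT A =====
-- literal transliteration of Source A: six `any` scans over set(features), each adding one label, then sorted
def capabilities_from_aimlapi_py (features : List String) : List String :=
  let caps : PySem.Set String := PySem.Set.empty
  let features_set : PySem.Set String := PySem.Set.ofList features
  let caps := if features_set.any (fun f => PySem.Str.isIn "vision" f) then caps.add "vision" else caps
  let caps := if features_set.any (fun f => PySem.Str.isIn "function" f || PySem.Str.isIn "tool" f) then caps.add "tools" else caps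
  let caps := if features_set.any (fun f => PySem.Str.isIn "audio" f) then caps.add "audio" else caps
  let caps := if features_set.any (fun f => PySem.Str.isIn "code" f) then caps.add "code" else caps
  let caps := if features_set.any (fun f => PySem.Str.isIn "reasoning" f || PySem.Str.isIn "thinking" f) then caps.add "reasoning" else caps
  let caps := if features_set.any (fun f => PySem.Str.isIn "embed" f) then caps.add "embedding" else caps
  PySem.List.sorted caps (fun x => x) false

-- ===== PORT B =====
-- body of B's loop: one feature may add several capabilities to the set
def pvAltStep (caps : PySem.Set String) (f : String) : PySem.Set String :=
  let caps := if PySem.Str.isIn "vision" f then caps.add "vision" else caps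
  let caps := if PySem.Str.isIn "function" f || PySem.Str.isIn "tool" f then caps.add "tools" else caps
  let caps := if PySem.Str.isIn "audio" f then caps.add "audio" else caps
  let caps := if PySem.Str.isIn "code" f then caps.add "code" else caps
  let caps := if PySem.Str.isIn "reasoning" f || PySem.Str.isIn "thinking" f then caps.add "reasoning" else caps
  let caps := if PySem.Str.isIn "embed" f then caps.add "embedding" else caps
  caps

def capabilities_from_aimlapi_py_alt (features : List String) : List String :=
  PySem.List.sorted (features.foldl pvAltStep PySem.Set.empty) (fun x => x) false

-- ===== PRECONDITION & SPEC =====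
def Spec_capabilities_from_aimlapi_py (features : List String) (out : List String) : Prop := out = capabilities_from_aimlapi_py_alt features
instance (features : List String) (out : List String) : Decidable (Spec_capabilities_from_aimlapi_py features out) := by unfold Spec_capabilities_from_aimlapi_py; infer_instance

-- ===== CLAIM (what is proved, stated in full; the proofs are below) =====
def Claim_equal_capabilities_from_aimlapi_py : Prop := ∀ (features : List String), Dom_capabilities_from_aimlapi_py features → Spec_capabilities_from_aimlapi_py features (capabilities_from_aimlapi_py features)

-- ===== LEMMAS AND PROOFS =====

-- membership in a conditional add
lemma mem_condAdd (s : PySem.Set String) (c : Bool) (a x : String) :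
    x ∈ (if c then PySem.Set.add s a else s) ↔ x ∈ s ∨ (c = true ∧ x = a) := by
  cases c <;> simp [PySem.Set.mem_add]

-- a conditional add preserves Nodup
lemma nodup_condAdd (s : PySem.Set String) (c : Bool) (a : String) (h : s.Nodup) :
    (if c then PySem.Set.add s a else s).Nodup := by
  split
  · exact PySem.Set.nodup_add s a h
  · exact h

-- "feature f contributes capability x"
def pvContrib (x f : String) : Prop :=
  (PySem.Str.isIn "vision" f = true ∧ x = "vision") ∨
  ((PySem.Str.isIn "function" f || PySem.Str.isIn "tool" f) = true ∧ x = "tools") ∨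
  (PySem.Str.isIn "audio" f = true ∧ x = "audio") ∨
  (PySem.Str.isIn "code" f = true ∧ x = "code") ∨
  ((PySem.Str.isIn "reasoning" f || PySem.Str.isIn "thinking" f) = true ∧ x = "reasoning") ∨
  (PySem.Str.isIn "embed" f = true ∧ x = "embedding")

lemma mem_pvAltStep (s : PySem.Set String) (f x : String) :
    x ∈ pvAltStep s f ↔ x ∈ s ∨ pvContrib x f := by
  simp only [pvAltStep, mem_condAdd, pvContrib, or_assoc]

lemma nodup_pvAltStep (s : PySem.Set String) (f : String) (h : s.Nodup) :
    (pvAltStep s f).Nodup := by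
  simp only [pvAltStep]
  exact nodup_condAdd _ _ _ (nodup_condAdd _ _ _ (nodup_condAdd _ _ _
    (nodup_condAdd _ _ _ (nodup_condAdd _ _ _ (nodup_condAdd _ _ _ h)))))

lemma mem_foldl_pvAltStep (features : List String) (s : PySem.Set String) (x : String) :
    x ∈ features.foldl pvAltStep s ↔ x ∈ s ∨ ∃ f ∈ features, pvContrib x f := by
  induction features generalizing s with
  | nil => simp
  | cons g t ih =>
      simp only [List.foldl_cons, ih, mem_pvAltStep, List.mem_cons]
      constructor
      · rintro ((h | h) | ⟨f, hf, hc⟩)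
        · exact Or.inl h
        · exact Or.inr ⟨g, Or.inl rfl, h⟩
        · exact Or.inr ⟨f, Or.inr hf, hc⟩
      · rintro (h | ⟨f, (rfl | hf), hc⟩)
        · exact Or.inl (Or.inl h)
        · exact Or.inl (Or.inr hc)
        · exact Or.inr ⟨f, hf, hc⟩

lemma nodup_foldl_pvAltStep (features : List String) (s : PySem.Set String) (h : s.Nodup) :
    (features.foldl pvAltStep s).Nodup := by
  induction features generalizing s with
  | nil => exact h
  | cons g t ih => exact ih _ (nodup_pvAltStep s g h)

-- A's accumulated set, before sorting (same text as the port's body)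
def pvCapsA (features : List String) : PySem.Set String :=
  let caps : PySem.Set String := PySem.Set.empty
  let features_set : PySem.Set String := PySem.Set.ofList features
  let caps := if features_set.any (fun f => PySem.Str.isIn "vision" f) then caps.add "vision" else caps
  let caps := if features_set.any (fun f => PySem.Str.isIn "function" f || PySem.Str.isIn "tool" f) then caps.add "tools" else caps
  let caps := if features_set.any (fun f => PySem.Str.isIn "audio" f) then caps.add "audio" else caps
  let caps := if features_set.any (fun f => PySem.Str.isIn "code" f) then caps.add "code" else caps
  let caps := if features_set.any (fun f => PySem.Str.isIn "reasoning" f || PySem.Str.isIn "thinking" f) then caps.add "reasoning" else caps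
  let caps := if features_set.any (fun f => PySem.Str.isIn "embed" f) then caps.add "embedding" else caps
  caps

lemma capsA_eq (features : List String) :
    capabilities_from_aimlapi_py features = PySem.List.sorted (pvCapsA features) (fun x => x) false := rfl

set_option maxHeartbeats 1000000 in
lemma mem_pvCapsA (features : List String) (x : String) :
    x ∈ pvCapsA features ↔ ∃ f ∈ features, pvContrib x f := by
  simp only [pvCapsA, mem_condAdd, or_assoc]
  simp only [PySem.Set.empty, List.not_mem_nil, false_or, List.any_eq_true,
    PySem.Set.mem_ofList, pvContrib]
  constructor
  · rintro (⟨⟨f, hf, hc⟩, hx⟩ | ⟨⟨f, hf, hc⟩, hx⟩ | ⟨⟨f, hf, hc⟩, hx⟩ | ⟨⟨f, hf, hc⟩, hx⟩ |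
      ⟨⟨f, hf, hc⟩, hx⟩ | ⟨⟨f, hf, hc⟩, hx⟩) <;> exact ⟨f, hf, by tauto⟩
  · rintro ⟨f, hf, (⟨hc, hx⟩ | ⟨hc, hx⟩ | ⟨hc, hx⟩ | ⟨hc, hx⟩ | ⟨hc, hx⟩ | ⟨hc, hx⟩)⟩ <;>
      [exact Or.inl ⟨⟨f, hf, hc⟩, hx⟩; exact Or.inr (Or.inl ⟨⟨f, hf, hc⟩, hx⟩);
       exact Or.inr (Or.inr (Or.inl ⟨⟨f, hf, hc⟩, hx⟩));
       exact Or.inr (Or.inr (Or.inr (Or.inl ⟨⟨f, hf, hc⟩, hx⟩)));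
       exact Or.inr (Or.inr (Or.inr (Or.inr (Or.inl ⟨⟨f, hf, hc⟩, hx⟩))));
       exact Or.inr (Or.inr (Or.inr (Or.inr (Or.inr ⟨⟨f, hf, hc⟩, hx⟩))))]

lemma nodup_pvCapsA (features : List String) : (pvCapsA features).Nodup := by
  simp only [pvCapsA]
  refine nodup_condAdd _ _ _ (nodup_condAdd _ _ _ (nodup_condAdd _ _ _
    (nodup_condAdd _ _ _ (nodup_condAdd _ _ _ (nodup_condAdd _ _ _ ?_)))))
  exact List.nodup_nil

lemma capsA_perm_capsB (features : List String) :
    (pvCapsA features).Perm (features.foldl pvAltStep PySem.Set.empty) := by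
  rw [List.perm_ext_iff_of_nodup (nodup_pvCapsA features)
    (nodup_foldl_pvAltStep features PySem.Set.empty List.nodup_nil)]
  intro x
  rw [mem_pvCapsA, mem_foldl_pvAltStep]
  simp [PySem.Set.empty]

-- ===== VERDICT (by name: the statement is the Claim_ definition above) =====
theorem capabilities_from_aimlapi_py_spec : Claim_equal_capabilities_from_aimlapi_py := by
  intro features _
  show capabilities_from_aimlapi_py features = capabilities_from_aimlapi_py_alt features
  rw [capsA_eq, capabilities_from_aimlapi_py_alt]
  exact PySem.List.sorted_eq_sorted_of_perm _ _ _ (fun a b h => h) (capsA_perm_capsB features)
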